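-- pv_equiv track=rewrite | github.com/hadilq/hair-colorization | src/hair_colorization.py | insert_layers
-- ===== SOURCE A (Python) =====
-- def insert_layers(old_layers, new_layers_insert_map):
--     count = 0
--     updated_layers = []
--     while count < len(old_layers):
--         if count in new_layers_insert_map:
--             updated_layers.extend(new_layers_insert_map[count])
--             del new_layers_insert_map[count]
--         else:
--             updated_layers.append(old_layers[count])
--             count += 1
--
--     rest_keys = sorted(new_layers_insert_map.keys())
--     for k in rest_keys:
--         updated_layers.extend(new_layers_insert_map[k])
--     return updated_layers
-- ===== SOURCE B (Python) =====
-- def insert_layers(old_layers, new_layers_insert_map):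
--     L = len(old_layers)
--     result = []
--     for i, x in enumerate(old_layers):
--         result.extend(new_layers_insert_map.get(i, []))
--         result.append(x)
--     for k in sorted(k for k in new_layers_insert_map if not (0 <= k < L)):
--         result.extend(new_layers_insert_map[k])
--     return result
-- ===== Notes on version B (the rewrite author's own statement) =====
-- stated objective: simpler
-- what changed: Replaces A's while-loop that mutates the dict (re-testing membership and deleting keys, with a counter that only sometimes advances) by one read-only pass over enumerate(old_layers) using dict.get plus a sorted tail of the out-of-range keys; B does not mutate new_layers_insert_map (return values are equal).
import Mathlib
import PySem

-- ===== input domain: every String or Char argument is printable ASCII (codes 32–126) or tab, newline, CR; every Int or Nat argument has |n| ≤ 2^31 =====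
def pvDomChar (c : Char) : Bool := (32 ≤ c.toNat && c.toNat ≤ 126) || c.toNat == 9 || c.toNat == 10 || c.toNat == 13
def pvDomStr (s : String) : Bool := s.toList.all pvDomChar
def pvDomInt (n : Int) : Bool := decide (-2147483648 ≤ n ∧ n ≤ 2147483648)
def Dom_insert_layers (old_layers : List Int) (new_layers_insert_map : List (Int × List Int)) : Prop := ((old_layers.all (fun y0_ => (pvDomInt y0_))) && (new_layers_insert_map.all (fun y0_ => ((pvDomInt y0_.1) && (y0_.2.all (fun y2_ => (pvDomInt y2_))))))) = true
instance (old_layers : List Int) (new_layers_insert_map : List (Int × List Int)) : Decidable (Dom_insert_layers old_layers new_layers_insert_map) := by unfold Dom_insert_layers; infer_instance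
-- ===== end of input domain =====

-- B replaces A's mutating while-loop by one read-only pass over enumerate(old_layers) plus a
-- sorted tail of the out-of-range keys (objective: simpler). Return values are proved equal;
-- note A additionally mutates new_layers_insert_map (deletes the in-range keys) while B does not.

-- ===== PORT A =====
-- termination helper: deleting a present key strictly shrinks the dict's item list
theorem pvEraseLen {d : PySem.Dict Int (List Int)} {k : Int}
    (h : d.contains k = true) : (d.erase k).items.length < d.items.length := by
  apply List.length_filter_lt_length_iff_exists.mpr
  rcases List.any_eq_true.mp h with ⟨p, hp, hpk⟩
  exact ⟨p, hp, by simp [hpk]⟩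

-- the while-loop of A: count advances only when count is not a key; a hit extends with
-- d[count] ('count in d' + 'd[count]' ported as contains + getD, the key being present)
-- and deletes the key; on exit, the remaining keys are appended in sorted order.
def insert_layers_loop (old_layers : List Int) (d : PySem.Dict Int (List Int))
    (count : Nat) (acc : List Int) : List Int :=
  if h : count < old_layers.length then
    if hm : d.contains (count : Int) then
      insert_layers_loop old_layers (d.erase (count : Int)) count (acc ++ d.getD (count : Int) [])
    else
      insert_layers_loop old_layers d (count + 1) (acc ++ [old_layers[count]])
  else
    (PySem.List.sorted d.keys (fun x => x) false).foldl (fun a k => a ++ d.getD k []) acc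
termination_by (old_layers.length - count) + d.items.length
decreasing_by
  · have := pvEraseLen hm; omega
  · omega

def insert_layers (old_layers : List Int) (new_layers_insert_map : List (Int × List Int)) : List Int :=
  insert_layers_loop old_layers (PySem.Dict.ofList new_layers_insert_map) 0 []

-- ===== PORT B =====
def insert_layers_alt (old_layers : List Int) (new_layers_insert_map : List (Int × List Int)) : List Int :=
  let d := PySem.Dict.ofList new_layers_insert_map
  let L : Int := old_layers.length
  let result := (PySem.List.enumerate old_layers).foldl
    (fun a p => (a ++ d.getD p.1 []) ++ [p.2]) []
  (PySem.List.sorted (d.keys.filter (fun k => !(decide ((0 : Int) ≤ k) && decide (k < L))))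
      (fun x => x) false).foldl (fun a k => a ++ d.getD k []) result

-- ===== PRECONDITION & SPEC =====
def Spec_insert_layers (old_layers : List Int) (new_layers_insert_map : List (Int × List Int)) (out : List Int) : Prop := out = insert_layers_alt old_layers new_layers_insert_map
instance (old_layers : List Int) (new_layers_insert_map : List (Int × List Int)) (out : List Int) : Decidable (Spec_insert_layers old_layers new_layers_insert_map out) := by unfold Spec_insert_layers; infer_instance

-- ===== CLAIM (what is proved, stated in full; the proofs are below) =====
def Claim_equal_insert_layers : Prop := ∀ (old_layers : List Int) (new_layers_insert_map : List (Int × List Int)), Dom_insert_layers old_layers new_layers_insert_map → Spec_insert_layers old_layers new_layers_insert_map (insert_layers old_layers new_layers_insert_map)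

-- ===== LEMMAS AND PROOFS =====

-- dict-erase facts (erase filters the item list)
theorem pvFindFilter (l : List (Int × List Int)) (j k : Int) (h : j ≠ k) :
    (l.filter (fun p => !(p.1 == k))).find? (fun p => p.1 == j) = l.find? (fun p => p.1 == j) := by
  induction l with
  | nil => rfl
  | cons x t ih =>
    by_cases hx : x.1 = k
    · have hkj : (x.1 == j) = false := beq_eq_false_iff_ne.mpr (by rw [hx]; exact Ne.symm h)
      simp [List.filter_cons, hx, List.find?_cons, hkj, ih, beq_eq_false_iff_ne.mpr (Ne.symm h)]
    · simp [List.filter_cons, hx, List.find?_cons, ih]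

theorem pvContainsEraseSelf (d : PySem.Dict Int (List Int)) (k : Int) :
    (d.erase k).contains k = false := by
  simp only [PySem.Dict.erase, PySem.Dict.contains]
  rw [List.any_eq_false]
  intro p hp
  simpa using List.of_mem_filter hp

theorem pvGetDEraseNe (d : PySem.Dict Int (List Int)) {j k : Int} (h : j ≠ k) (dflt : List Int) :
    (d.erase k).getD j dflt = d.getD j dflt := by
  simp [PySem.Dict.erase, PySem.Dict.getD, PySem.Dict.get?, pvFindFilter d.items j k h]

theorem pvEraseNotContains (d : PySem.Dict Int (List Int)) {k : Int}
    (h : d.contains k = false) : d.erase k = d := by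
  apply PySem.Dict.ext
  simp only [PySem.Dict.erase]
  apply List.filter_eq_self.mpr
  intro p hp
  simp only [PySem.Dict.contains] at h
  have := List.any_eq_false.mp h p hp
  simpa using this

theorem pvKeysErase (d : PySem.Dict Int (List Int)) (k : Int) :
    (d.erase k).keys = d.keys.filter (fun x => !(x == k)) := by
  show (d.items.filter _).map _ = (d.items.map _).filter _
  induction d.items with
  | nil => rfl
  | cons x t ih =>
    by_cases hx : x.1 = k
    · simp [List.filter_cons, hx, ih]
    · simp [List.filter_cons, hx, ih]

theorem pvFlatMapCongr {α β : Type} {l : List α} {f g : α → List β}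
    (h : ∀ x ∈ l, f x = g x) : l.flatMap f = l.flatMap g := by
  induction l with
  | nil => rfl
  | cons x t ih =>
    simp only [List.flatMap_cons]
    rw [h x (by simp), ih (fun y hy => h y (by simp [hy]))]

theorem pvEnumFstGe {α : Type} (xs : List α) (i : Int) (p : Int × α)
    (h : p ∈ PySem.List.enumerate xs i) : i ≤ p.1 := by
  induction xs generalizing i with
  | nil => simp [PySem.List.enumerate] at h
  | cons x t ih =>
    simp only [PySem.List.enumerate, List.mem_cons] at h
    rcases h with h | h
    · simp [h]
    · have := ih (i + 1) h; omega

theorem pvEnumDrop (old_layers : List Int) (count : Nat) (h : count < old_layers.length) :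
    PySem.List.enumerate (old_layers.drop count) (count : Int)
      = ((count : Int), old_layers[count]) :: PySem.List.enumerate (old_layers.drop (count + 1)) ((count : Int) + 1) := by
  rw [List.drop_eq_getElem_cons h]
  rfl

-- one combined iteration of A's while-loop: a hit at count is always followed by the
-- (now key-free) append of old_layers[count]
theorem pvLoopStep (old_layers : List Int) (d : PySem.Dict Int (List Int))
    (count : Nat) (acc : List Int) (h : count < old_layers.length) :
    insert_layers_loop old_layers d count acc
      = insert_layers_loop old_layers (d.erase (count : Int)) (count + 1)
          ((acc ++ d.getD (count : Int) []) ++ [old_layers[count]]) := by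
  by_cases hm : d.contains (count : Int) = true
  · rw [insert_layers_loop]
    simp only [h, hm]
    simp only [dite_true, if_true, dif_pos]
    rw [insert_layers_loop]
    simp only [h, pvContainsEraseSelf]
    simp
  · rw [insert_layers_loop]
    simp only [h, hm]
    simp only [Bool.false_eq_true, dite_true, if_false, dif_pos]
    rw [pvEraseNotContains d (by simpa using hm),
        PySem.Dict.getD_of_not_contains d [] (by simpa using hm)]
    simp

theorem pvCondSplit (a c L : Int) (h : c < L) :
    (!(decide (c + 1 ≤ a) && decide (a < L)) && !(a == c))
      = !(decide (c ≤ a) && decide (a < L)) := by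
  simp only [show (a == c) = decide (a = c) from rfl]
  by_cases h0 : a = c <;> by_cases h1 : c + 1 ≤ a <;> by_cases h2 : a < L <;>
    simp [h0, h1, h2] <;> omega

-- characterisation of A's loop: the produced list is acc, then for each remaining index its
-- inserted block and the old element, then the surviving (out-of-range) keys sorted
theorem pvLoopEq (old_layers : List Int) :
    ∀ (n count : Nat) (d : PySem.Dict Int (List Int)) (acc : List Int),
    old_layers.length - count = n →
    insert_layers_loop old_layers d count acc
      = acc
        ++ (PySem.List.enumerate (old_layers.drop count) (count : Int)).flatMap
             (fun p => d.getD p.1 [] ++ [p.2])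
        ++ (PySem.List.sorted
              (d.keys.filter (fun k => !(decide ((count : Int) ≤ k) && decide (k < (old_layers.length : Int)))))
              (fun x => x) false).flatMap (fun k => d.getD k []) := by
  intro n
  induction n with
  | zero =>
    intro count d acc hn
    have h : ¬ count < old_layers.length := by omega
    rw [insert_layers_loop]
    simp only [dif_neg h]
    rw [PySem.List.foldl_append_eq_flatMap]
    have hdrop : old_layers.drop count = [] := List.drop_eq_nil_of_le (by omega)
    have hfilt : d.keys.filter (fun k => !(decide ((count : Int) ≤ k) && decide (k < (old_layers.length : Int)))) = d.keys := by
      apply List.filter_eq_self.mpr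
      intro a _
      by_cases h1 : (count : Int) ≤ a <;> by_cases h2 : a < (old_layers.length : Int) <;>
        simp [h1, h2] <;> omega
    rw [hdrop, hfilt]
    simp [PySem.List.enumerate]
  | succ n ih =>
    intro count d acc hn
    have h : count < old_layers.length := by omega
    rw [pvLoopStep old_layers d count acc h]
    rw [ih (count + 1) (d.erase (count : Int)) _ (by omega)]
    -- rewrite lookups in the erased dict back to d
    have hbody : (PySem.List.enumerate (old_layers.drop (count + 1)) ((count + 1 : Nat) : Int)).flatMap
          (fun p => (d.erase (count : Int)).getD p.1 [] ++ [p.2])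
        = (PySem.List.enumerate (old_layers.drop (count + 1)) ((count + 1 : Nat) : Int)).flatMap
          (fun p => d.getD p.1 [] ++ [p.2]) := by
      apply pvFlatMapCongr
      intro p hp
      have hge := pvEnumFstGe _ _ _ hp
      rw [pvGetDEraseNe d (by push_cast at hge ⊢; omega) []]
    have hkeys : (d.erase (count : Int)).keys.filter
          (fun k => !(decide (((count + 1 : Nat) : Int) ≤ k) && decide (k < (old_layers.length : Int))))
        = d.keys.filter (fun k => !(decide ((count : Int) ≤ k) && decide (k < (old_layers.length : Int)))) := by
      rw [pvKeysErase, List.filter_filter]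
      apply List.filter_congr
      intro a _
      push_cast
      exact pvCondSplit a (count : Int) (old_layers.length : Int) (by omega)
    have htail : (PySem.List.sorted
            ((d.erase (count : Int)).keys.filter
              (fun k => !(decide (((count + 1 : Nat) : Int) ≤ k) && decide (k < (old_layers.length : Int)))))
            (fun x => x) false).flatMap (fun k => (d.erase (count : Int)).getD k [])
        = (PySem.List.sorted
            (d.keys.filter (fun k => !(decide ((count : Int) ≤ k) && decide (k < (old_layers.length : Int)))))
            (fun x => x) false).flatMap (fun k => d.getD k []) := by
      rw [hkeys]
      apply pvFlatMapCongr
      intro k hk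
      rw [PySem.List.mem_sorted] at hk
      have hk' := List.of_mem_filter hk
      have hnotin : k < (count : Int) ∨ (old_layers.length : Int) ≤ k := by
        simpa using hk'
      have hkc : k ≠ (count : Int) := by
        intro h0
        rcases hnotin with h' | h' <;> omega
      exact pvGetDEraseNe d hkc []
    rw [hbody, htail, pvEnumDrop old_layers count h]
    simp [List.flatMap_cons]

theorem pvAltFoldBody (d : PySem.Dict Int (List Int)) (old_layers : List Int) (acc : List Int) :
    (PySem.List.enumerate old_layers).foldl (fun a p => (a ++ d.getD p.1 []) ++ [p.2]) acc
      = acc ++ (PySem.List.enumerate old_layers).flatMap (fun p => d.getD p.1 [] ++ [p.2]) := by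
  have : (fun (a : List Int) (p : Int × Int) => (a ++ d.getD p.1 []) ++ [p.2])
       = (fun (a : List Int) (p : Int × Int) => a ++ (d.getD p.1 [] ++ [p.2])) := by
    funext a p; rw [List.append_assoc]
  rw [this, PySem.List.foldl_append_eq_flatMap]

-- ===== VERDICT (by name: the statement is the Claim_ definition above) =====
theorem insert_layers_spec : Claim_equal_insert_layers := by
  intro old_layers new_layers_insert_map _
  unfold Spec_insert_layers
  rw [insert_layers, insert_layers_alt]
  rw [pvLoopEq old_layers (old_layers.length - 0) 0 _ [] rfl]
  rw [pvAltFoldBody, PySem.List.foldl_append_eq_flatMap]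
  simp
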